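-- pv_equiv track=rewrite | github.com/Zyyeric/Aegaeon | aegaeon/quick_model_loader/quick_model_loader/model_loader.py | create_cuts
-- ===== SOURCE A (Python) =====
-- from typing import Optional, List, Tuple, Generator, Dict, Union
--
-- def create_cuts(size: int, cuts_num: int) -> List[Tuple[int, int]]:
--     cuts = []
--     mod = size % cuts_num
--     for i in range(cuts_num):
--         if i == 0:
--             start = 0
--         else:
--             start = cuts[i - 1][1]
--         if i == cuts_num - 1:
--             end = size
--         else:
--             end = start + size // cuts_num
--             if i < mod:
--                 end += 1
--         cuts.append((start, end))
--     return cuts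
-- ===== SOURCE B (Python) =====
-- def create_cuts(size, cuts_num):
--     base, mod = divmod(size, cuts_num)
--     return [(i * base + min(i, mod), (i + 1) * base + min(i + 1, mod))
--             for i in range(cuts_num)]
-- ===== Notes on version B (the rewrite author's own statement) =====
-- stated objective: simpler
-- what changed: Replaces A's sequential loop that threads each cut's start from the previous cut's end (with a special case for the last cut) by a single comprehension computing each cut independently from the closed form (i*base + min(i,mod), (i+1)*base + min(i+1,mod)).
import Mathlib
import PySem

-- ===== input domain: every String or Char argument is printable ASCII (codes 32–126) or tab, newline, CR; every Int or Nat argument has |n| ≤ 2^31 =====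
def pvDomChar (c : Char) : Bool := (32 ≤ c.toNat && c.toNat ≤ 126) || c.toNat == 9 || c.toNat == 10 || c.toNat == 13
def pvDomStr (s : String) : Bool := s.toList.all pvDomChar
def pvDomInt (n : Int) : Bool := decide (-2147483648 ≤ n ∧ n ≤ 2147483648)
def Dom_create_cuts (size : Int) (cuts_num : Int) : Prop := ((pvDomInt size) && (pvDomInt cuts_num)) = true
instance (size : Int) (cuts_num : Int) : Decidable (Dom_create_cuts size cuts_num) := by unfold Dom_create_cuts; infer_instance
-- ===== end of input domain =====

-- B replaces A's sequential accumulation (each start read back from the previous cut) by an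
-- independent closed-form formula per cut: simpler, no threaded state, no last-cut special case.

-- ===== PORT A =====
-- cuts[i-1][1]: the index is always in range inside the loop, ported with pyGetD (default never used)
def create_cuts (size : Int) (cuts_num : Int) : List (Int × Int) :=
  let mod := PySem.Int.mod size cuts_num
  (PySem.List.pyRange 0 cuts_num 1).foldl (fun cuts i =>
    let start : Int := if i = 0 then 0 else (PySem.List.pyGetD cuts (i - 1) (0, 0)).2
    let e : Int :=
      if i = cuts_num - 1 then size
      else
        let e0 := start + PySem.Int.floordiv size cuts_num
        if i < mod then e0 + 1 else e0
    cuts ++ [(start, e)]) []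

-- ===== PORT B =====
def create_cuts_alt (size : Int) (cuts_num : Int) : List (Int × Int) :=
  let base := PySem.Int.floordiv size cuts_num
  let mod := PySem.Int.mod size cuts_num
  (PySem.List.pyRange 0 cuts_num 1).map (fun i =>
    (i * base + min i mod, (i + 1) * base + min (i + 1) mod))

-- ===== PRECONDITION & SPEC =====
-- Python raises ZeroDivisionError (in both A and B) at cuts_num = 0; that is the only exclusion.
def Pre_create_cuts (_size : Int) (cuts_num : Int) : Prop := cuts_num ≠ 0
instance (size : Int) (cuts_num : Int) : Decidable (Pre_create_cuts size cuts_num) := by unfold Pre_create_cuts; infer_instance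
def pvWitness_create_cuts : Int × Int := (10, 3)

def Spec_create_cuts (size : Int) (cuts_num : Int) (out : List (Int × Int)) : Prop := out = create_cuts_alt size cuts_num
instance (size : Int) (cuts_num : Int) (out : List (Int × Int)) : Decidable (Spec_create_cuts size cuts_num out) := by unfold Spec_create_cuts; infer_instance

-- ===== CLAIM (what is proved, stated in full; the proofs are below) =====
def Claim_equal_create_cuts : Prop := ∀ (size : Int) (cuts_num : Int), Dom_create_cuts size cuts_num → Pre_create_cuts size cuts_num → Spec_create_cuts size cuts_num (create_cuts size cuts_num)

-- ===== LEMMAS AND PROOFS =====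

-- Invariant: A's loop over range(k) has built exactly B's closed-form list for the first k cuts.
theorem cuts_invariant (size n : Int) (hn : 0 < n) (k : Nat) (hk : (k : Int) ≤ n) :
    (PySem.List.pyRange 0 (k : Int) 1).foldl (fun cuts i =>
      let start : Int := if i = 0 then 0 else (PySem.List.pyGetD cuts (i - 1) (0, 0)).2
      let e : Int :=
        if i = n - 1 then size
        else
          let e0 := start + PySem.Int.floordiv size n
          if i < PySem.Int.mod size n then e0 + 1 else e0
      cuts ++ [(start, e)]) []
    = (PySem.List.pyRange 0 (k : Int) 1).map (fun i =>
        (i * PySem.Int.floordiv size n + min i (PySem.Int.mod size n),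
         (i + 1) * PySem.Int.floordiv size n + min (i + 1) (PySem.Int.mod size n))) := by
  induction k with
  | zero => simp
  | succ k ih =>
    have hk' : (k : Int) ≤ n := by push_cast at hk ⊢; omega
    have hsplit : PySem.List.pyRange 0 ((k : Int) + 1) 1
        = PySem.List.pyRange 0 (k : Int) 1 ++ [(k : Int)] :=
      PySem.List.pyRange_one_succ_right (by positivity)
    have hmn : 0 ≤ PySem.Int.mod size n := PySem.Int.mod_nonneg size hn
    have hml : PySem.Int.mod size n < n := PySem.Int.mod_lt size hn
    have hid : PySem.Int.floordiv size n * n + PySem.Int.mod size n = size :=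
      PySem.Int.floordiv_mul_add_mod size n
    push_cast
    rw [hsplit, List.foldl_append, List.map_append, ih hk']
    simp only [List.foldl_cons, List.foldl_nil, List.map_cons, List.map_nil]
    set b := PySem.Int.floordiv size n with hb
    set m := PySem.Int.mod size n with hm
    -- the start of cut k equals the closed-form first component
    have hstart :
        (if (k : Int) = 0 then (0 : Int)
         else (PySem.List.pyGetD ((PySem.List.pyRange 0 (k : Int) 1).map (fun i =>
            (i * b + min i m, (i + 1) * b + min (i + 1) m))) ((k : Int) - 1) (0, 0)).2)
        = (k : Int) * b + min (k : Int) m := by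
      by_cases h0 : (k : Int) = 0
      · simp [h0]; omega
      · have hk1 : k - 1 < k := by omega
        have : ((k : Int) - 1) = ((k - 1 : Nat) : Int) := by omega
        rw [if_neg h0, this,
          PySem.List.pyGetD_map_pyRange (n := k) (k := k - 1) _ _ hk1]
        have : ((k - 1 : Nat) : Int) = (k : Int) - 1 := by omega
        rw [this]
        ring_nf
    rw [hstart]
    congr 1
    have harith : ∀ z w : Int, z = w →
        [((k : Int) * b + min (k : Int) m, z)] = [((k : Int) * b + min (k : Int) m, w)] := by
      intro z w h; rw [h]
    apply harith
    split_ifs with hlast hcm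
    · -- forced last end: size = (k+1)*b + min (k+1) m
      rw [hlast]
      have : min (n - 1 + 1) m = m := by omega
      rw [this]; ring_nf; linarith [hid]
    · have : min ((k : Int) + 1) m = min (k : Int) m + 1 := by omega
      rw [this]; ring
    · have : min ((k : Int) + 1) m = min (k : Int) m := by omega
      rw [this]; ring

-- ===== VERDICT (by name: the statement is the Claim_ definition above) =====
theorem create_cuts_spec : Claim_equal_create_cuts := by
  intro size n _ hn
  unfold Pre_create_cuts at hn
  unfold Spec_create_cuts create_cuts create_cuts_alt
  by_cases hpos : 0 < n
  · have hcast : ((n.toNat : Nat) : Int) = n := Int.toNat_of_nonneg (le_of_lt hpos)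
    have := cuts_invariant size n hpos n.toNat (by omega)
    rw [hcast] at this
    simpa using this
  · have : n < 0 := by omega
    simp [PySem.List.pyRange_one_eq_nil (by omega : n ≤ (0 : Int))]
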